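-- pv_equiv track=rewrite | github.com/MaxBertolo/MaxBits | src/patent_collector.py | _tag_patent
-- ===== SOURCE A (Python) =====
-- from typing import List, Dict
--
-- def _tag_patent(title: str, abstract: str, cpc: List[str]) -> List[str]:
--     text = f"{title} {abstract}".lower()
--     tags: List[str] = []
--
--     if any(code.startswith(("G06F", "G06N", "G11")) for code in cpc) or \
--        any(k in text for k in ["compute", "processor", "gpu", "accelerator", "cpu"]):
--         tags.append("compute")
--
--     if any(code.startswith(("G06Q", "H04L")) for code in cpc) or \
--        any(k in text for k in ["data", "database", "analytics", "storage"]):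
--         tags.append("data")
--
--     if any(code.startswith(("H04N", "H04S")) for code in cpc) or \
--        any(k in text for k in ["video", "codec", "encoding", "transcoding", "streaming"]):
--         tags.append("video")
--
--     if any(k in text for k in ["cloud", "saas", "paas", "iaas", "data center", "datacenter"]):
--         tags.append("cloud")
--
--     # dedup
--     return sorted(set(tags))
-- ===== SOURCE B (Python) =====
-- from typing import List
--
-- # Inverted indexes: prefix -> tag and keyword -> tag.  One pass over the CPC
-- # codes with O(1) dict lookups on code[:3] / code[:4] (all prefixes have
-- # length 3 or 4), one pass over the keyword index, and the result is emitted
-- # by membership test in fixed alphabetical tag order (no set()+sorted() step).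
-- PREFIX_TO_TAG = {
--     "G06F": "compute", "G06N": "compute", "G11": "compute",
--     "G06Q": "data", "H04L": "data",
--     "H04N": "video", "H04S": "video",
-- }
--
-- KEYWORD_TO_TAG = {
--     "compute": "compute", "processor": "compute", "gpu": "compute",
--     "accelerator": "compute", "cpu": "compute",
--     "data": "data", "database": "data", "analytics": "data", "storage": "data",
--     "video": "video", "codec": "video", "encoding": "video",
--     "transcoding": "video", "streaming": "video",
--     "cloud": "cloud", "saas": "cloud", "paas": "cloud", "iaas": "cloud",
--     "data center": "cloud", "datacenter": "cloud",
-- }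
--
-- def _tag_patent(title: str, abstract: str, cpc: List[str]) -> List[str]:
--     text = f"{title} {abstract}".lower()
--     found = set()
--     for code in cpc:
--         for pfx in (code[:3], code[:4]):
--             tag = PREFIX_TO_TAG.get(pfx)
--             if tag is not None:
--                 found.add(tag)
--     for kw, tag in KEYWORD_TO_TAG.items():
--         if kw in text:
--             found.add(tag)
--     return [t for t in ("cloud", "compute", "data", "video") if t in found]
-- ===== Notes on version B (the rewrite author's own statement) =====
-- stated objective: alternative
-- what changed: Inverts the rule direction: instead of four per-tag blocks each rescanning cpc and a keyword list and then sorted(set(...)), B builds prefix->tag and keyword->tag indexes, makes one pass over the CPC codes with O(1) dict lookups on code[:3]/code[:4], one pass over the keyword index accumulating a set, and emits the tags by membership in fixed alphabetical order with no sort/dedup step.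
import Mathlib
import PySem

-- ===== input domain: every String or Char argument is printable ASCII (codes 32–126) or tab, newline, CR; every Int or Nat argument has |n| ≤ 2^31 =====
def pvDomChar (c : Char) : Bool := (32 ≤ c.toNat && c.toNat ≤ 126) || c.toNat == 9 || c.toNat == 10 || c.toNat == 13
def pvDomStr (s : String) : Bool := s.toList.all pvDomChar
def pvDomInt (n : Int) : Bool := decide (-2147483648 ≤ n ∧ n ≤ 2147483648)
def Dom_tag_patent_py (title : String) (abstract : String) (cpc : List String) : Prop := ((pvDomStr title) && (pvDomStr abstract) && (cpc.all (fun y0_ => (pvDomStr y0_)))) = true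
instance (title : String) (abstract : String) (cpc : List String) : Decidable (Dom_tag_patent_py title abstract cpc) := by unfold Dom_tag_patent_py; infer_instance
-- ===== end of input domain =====

-- B inverts the rules: prefix->tag and keyword->tag indexes, one pass over the CPC codes
-- (dict lookups on code[:3]/code[:4]) and one over the keyword index accumulating a set,
-- then the tags are emitted by membership in fixed alphabetical order (alternative decomposition).


-- ===== PORT A =====
def tag_patent_py (title : String) (abstract : String) (cpc : List String) : List String :=
  let text := PySem.Str.lower (PySem.Str.join " " [title, abstract])
  let tags : List String := []
  let tags := if cpc.any (fun code => ["G06F", "G06N", "G11"].any (fun p => PySem.Str.startswith code p))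
                 || ["compute", "processor", "gpu", "accelerator", "cpu"].any (fun k => PySem.Str.isIn k text)
              then tags ++ ["compute"] else tags
  let tags := if cpc.any (fun code => ["G06Q", "H04L"].any (fun p => PySem.Str.startswith code p))
                 || ["data", "database", "analytics", "storage"].any (fun k => PySem.Str.isIn k text)
              then tags ++ ["data"] else tags
  let tags := if cpc.any (fun code => ["H04N", "H04S"].any (fun p => PySem.Str.startswith code p))
                 || ["video", "codec", "encoding", "transcoding", "streaming"].any (fun k => PySem.Str.isIn k text)
              then tags ++ ["video"] else tags
  let tags := if ["cloud", "saas", "paas", "iaas", "data center", "datacenter"].any (fun k => PySem.Str.isIn k text)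
              then tags ++ ["cloud"] else tags
  PySem.List.sorted (PySem.Set.ofList tags) (fun x => x) false

-- ===== PORT B =====
-- the two inverted indexes of Source B
def pvPrefixToTag : PySem.Dict String String :=
  PySem.Dict.ofList [("G06F","compute"),("G06N","compute"),("G11","compute"),
                     ("G06Q","data"),("H04L","data"),("H04N","video"),("H04S","video")]

def pvKeywordToTag : PySem.Dict String String :=
  PySem.Dict.ofList [("compute","compute"),("processor","compute"),("gpu","compute"),
                     ("accelerator","compute"),("cpu","compute"),
                     ("data","data"),("database","data"),("analytics","data"),("storage","data"),
                     ("video","video"),("codec","video"),("encoding","video"),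
                     ("transcoding","video"),("streaming","video"),
                     ("cloud","cloud"),("saas","cloud"),("paas","cloud"),("iaas","cloud"),
                     ("data center","cloud"),("datacenter","cloud")]

-- body of Source B's `for code in cpc` loop: look up code[:3] and code[:4] in the prefix index
def pvPrefixStep (s : PySem.Set String) (code : String) : PySem.Set String :=
  [PySem.Str.slice code none (some 3), PySem.Str.slice code none (some 4)].foldl
    (fun s pfx => match PySem.Dict.get? pvPrefixToTag pfx with
                  | some tag => PySem.Set.add s tag
                  | none => s) s

-- the `found` set after both loops of Source B
def pvFound (text : String) (cpc : List String) : PySem.Set String :=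
  (PySem.Dict.items pvKeywordToTag).foldl
    (fun s p => if PySem.Str.isIn p.1 text then PySem.Set.add s p.2 else s)
    (cpc.foldl pvPrefixStep PySem.Set.empty)

def tag_patent_py_alt (title : String) (abstract : String) (cpc : List String) : List String :=
  let text := PySem.Str.lower (PySem.Str.join " " [title, abstract])
  ["cloud", "compute", "data", "video"].filter (fun t => PySem.Set.contains (pvFound text cpc) t)

-- ===== PRECONDITION & SPEC =====
def Spec_tag_patent_py (title : String) (abstract : String) (cpc : List String) (out : List String) : Prop := out = tag_patent_py_alt title abstract cpc
instance (title : String) (abstract : String) (cpc : List String) (out : List String) : Decidable (Spec_tag_patent_py title abstract cpc out) := by unfold Spec_tag_patent_py; infer_instance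

-- ===== CLAIM (what is proved, stated in full; the proofs are below) =====
def Claim_equal_tag_patent_py : Prop := ∀ (title : String) (abstract : String) (cpc : List String), Dom_tag_patent_py title abstract cpc → Spec_tag_patent_py title abstract cpc (tag_patent_py title abstract cpc)

-- ===== LEMMAS AND PROOFS =====
set_option maxHeartbeats 1000000

lemma items_pvPrefixToTag : pvPrefixToTag.items =
    [("G06F","compute"),("G06N","compute"),("G11","compute"),
     ("G06Q","data"),("H04L","data"),("H04N","video"),("H04S","video")] := by decide

lemma items_pvKeywordToTag : pvKeywordToTag.items =
    [("compute","compute"),("processor","compute"),("gpu","compute"),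
     ("accelerator","compute"),("cpu","compute"),
     ("data","data"),("database","data"),("analytics","data"),("storage","data"),
     ("video","video"),("codec","video"),("encoding","video"),
     ("transcoding","video"),("streaming","video"),
     ("cloud","cloud"),("saas","cloud"),("paas","cloud"),("iaas","cloud"),
     ("data center","cloud"),("datacenter","cloud")] := by decide

lemma find?_key_cons {ν : Type} (a : String) (v : ν) (rest : List (String × ν)) (k : String) :
    List.find? (fun p => p.1 == k) ((a, v) :: rest) =
      if k = a then some (a, v) else List.find? (fun p => p.1 == k) rest := by
  by_cases h : k = a
  · subst h; simp [List.find?]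
  · have hb : (a == k) = false := beq_eq_false_iff_ne.mpr (fun e => h e.symm)
    simp [List.find?, hb, h]

lemma get?_pvPrefixToTag (k : String) : PySem.Dict.get? pvPrefixToTag k =
    if k = "G06F" then some "compute" else if k = "G06N" then some "compute"
    else if k = "G11" then some "compute" else if k = "G06Q" then some "data"
    else if k = "H04L" then some "data" else if k = "H04N" then some "video"
    else if k = "H04S" then some "video" else none := by
  simp only [PySem.Dict.get?, items_pvPrefixToTag, find?_key_cons, List.find?_nil]
  split_ifs <;> rfl

lemma get?_pf_compute (k : String) :
    PySem.Dict.get? pvPrefixToTag k = some "compute" ↔ (k = "G06F" ∨ k = "G06N" ∨ k = "G11") := by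
  rw [get?_pvPrefixToTag]; split_ifs <;> simp_all

lemma get?_pf_data (k : String) :
    PySem.Dict.get? pvPrefixToTag k = some "data" ↔ (k = "G06Q" ∨ k = "H04L") := by
  rw [get?_pvPrefixToTag]; split_ifs <;> simp_all

lemma get?_pf_video (k : String) :
    PySem.Dict.get? pvPrefixToTag k = some "video" ↔ (k = "H04N" ∨ k = "H04S") := by
  rw [get?_pvPrefixToTag]; split_ifs <;> simp_all

lemma get?_pf_cloud (k : String) : ¬ (PySem.Dict.get? pvPrefixToTag k = some "cloud") := by
  rw [get?_pvPrefixToTag]; split_ifs <;> simp_all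

-- membership through the keyword loop of Source B
lemma mem_kwFold (l : List (String × String)) (text : String) (s : PySem.Set String) (x : String) :
    x ∈ l.foldl (fun s p => if PySem.Str.isIn p.1 text then PySem.Set.add s p.2 else s) s ↔
      x ∈ s ∨ ∃ p ∈ l, PySem.Str.isIn p.1 text = true ∧ p.2 = x := by
  induction l generalizing s with
  | nil => simp
  | cons hd tl ih =>
    simp only [List.foldl_cons, ih, List.exists_mem_cons_iff]
    by_cases h : PySem.Str.isIn hd.1 text = true
    · rw [if_pos h]
      simp only [PySem.Set.mem_add]
      tauto
    · rw [if_neg h]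
      tauto

lemma mem_pvPrefixStep (s : PySem.Set String) (code x : String) :
    x ∈ pvPrefixStep s code ↔ x ∈ s ∨
      PySem.Dict.get? pvPrefixToTag (PySem.Str.slice code none (some 3)) = some x ∨
      PySem.Dict.get? pvPrefixToTag (PySem.Str.slice code none (some 4)) = some x := by
  unfold pvPrefixStep
  simp only [List.foldl_cons, List.foldl_nil]
  rcases h3 : PySem.Dict.get? pvPrefixToTag (PySem.Str.slice code none (some 3)) with _ | t3 <;>
    rcases h4 : PySem.Dict.get? pvPrefixToTag (PySem.Str.slice code none (some 4)) with _ | t4 <;>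
    simp [PySem.Set.mem_add, eq_comm] <;> tauto

lemma mem_foldl_pvPrefixStep (cpc : List String) (s : PySem.Set String) (x : String) :
    x ∈ cpc.foldl pvPrefixStep s ↔ x ∈ s ∨ ∃ code ∈ cpc,
      (PySem.Dict.get? pvPrefixToTag (PySem.Str.slice code none (some 3)) = some x ∨
       PySem.Dict.get? pvPrefixToTag (PySem.Str.slice code none (some 4)) = some x) := by
  induction cpc generalizing s with
  | nil => simp
  | cons hd tl ih =>
    simp only [List.foldl_cons, ih, mem_pvPrefixStep, List.exists_mem_cons_iff]
    exact or_assoc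

-- code[:n] = p (with |p| = n) is exactly code.startswith(p)
lemma slice_eq_iff_startswith (code p : String) (b : Int) (hb : 0 ≤ b)
    (hp : p.toList.length = b.toNat) :
    PySem.Str.slice code none (some b) = p ↔ PySem.Str.startswith code p = true := by
  rw [← String.toList_inj, PySem.Str.toList_slice, PySem.Chars.slice_eq_listSlice]
  rw [PySem.List.slice_to (xs := code.toList) hb]
  rw [PySem.Str.startswith_eq, PySem.Chars.startswith_iff, List.prefix_iff_eq_take, ← hp]
  exact eq_comm

lemma slice3_length (code p : String) (h : PySem.Str.slice code none (some 3) = p) :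
    p.toList.length ≤ 3 := by
  rw [← String.toList_inj, PySem.Str.toList_slice, PySem.Chars.slice_eq_listSlice] at h
  rw [PySem.List.slice_to (xs := code.toList) (by norm_num)] at h
  rw [← h]
  simpa using List.length_take_le _ code.toList

lemma slice4_G11 (code : String) (h : PySem.Str.slice code none (some 4) = "G11") :
    PySem.Str.slice code none (some 3) = "G11" := by
  rw [← String.toList_inj, PySem.Str.toList_slice, PySem.Chars.slice_eq_listSlice] at h ⊢
  rw [PySem.List.slice_to (xs := code.toList) (by norm_num)] at h
  rw [PySem.List.slice_to (xs := code.toList) (by norm_num)]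
  have ht : code.toList.take ((3:Int).toNat) = (code.toList.take ((4:Int).toNat)).take ((3:Int).toNat) := by
    rw [List.take_take]; norm_num
  rw [ht, h]
  decide

-- per-tag: the two index lookups of Source B are exactly A's startswith tests
lemma pHit_compute (code : String) :
    (PySem.Dict.get? pvPrefixToTag (PySem.Str.slice code none (some 3)) = some "compute" ∨
     PySem.Dict.get? pvPrefixToTag (PySem.Str.slice code none (some 4)) = some "compute") ↔
    (PySem.Str.startswith code "G06F" = true ∨ PySem.Str.startswith code "G06N" = true ∨
     PySem.Str.startswith code "G11" = true) := by
  rw [get?_pf_compute, get?_pf_compute]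
  constructor
  · rintro ((h | h | h) | (h | h | h))
    · exact absurd (slice3_length _ _ h) (by decide)
    · exact absurd (slice3_length _ _ h) (by decide)
    · exact Or.inr (Or.inr ((slice_eq_iff_startswith code "G11" 3 (by norm_num) (by decide)).mp h))
    · exact Or.inl ((slice_eq_iff_startswith code "G06F" 4 (by norm_num) (by decide)).mp h)
    · exact Or.inr (Or.inl ((slice_eq_iff_startswith code "G06N" 4 (by norm_num) (by decide)).mp h))
    · exact Or.inr (Or.inr ((slice_eq_iff_startswith code "G11" 3 (by norm_num) (by decide)).mp
        (slice4_G11 code h)))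
  · rintro (h | h | h)
    · exact Or.inr (Or.inl ((slice_eq_iff_startswith code "G06F" 4 (by norm_num) (by decide)).mpr h))
    · exact Or.inr (Or.inr (Or.inl ((slice_eq_iff_startswith code "G06N" 4 (by norm_num) (by decide)).mpr h)))
    · exact Or.inl (Or.inr (Or.inr ((slice_eq_iff_startswith code "G11" 3 (by norm_num) (by decide)).mpr h)))

lemma pHit_data (code : String) :
    (PySem.Dict.get? pvPrefixToTag (PySem.Str.slice code none (some 3)) = some "data" ∨
     PySem.Dict.get? pvPrefixToTag (PySem.Str.slice code none (some 4)) = some "data") ↔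
    (PySem.Str.startswith code "G06Q" = true ∨ PySem.Str.startswith code "H04L" = true) := by
  rw [get?_pf_data, get?_pf_data]
  constructor
  · rintro ((h | h) | (h | h))
    · exact absurd (slice3_length _ _ h) (by decide)
    · exact absurd (slice3_length _ _ h) (by decide)
    · exact Or.inl ((slice_eq_iff_startswith code "G06Q" 4 (by norm_num) (by decide)).mp h)
    · exact Or.inr ((slice_eq_iff_startswith code "H04L" 4 (by norm_num) (by decide)).mp h)
  · rintro (h | h)
    · exact Or.inr (Or.inl ((slice_eq_iff_startswith code "G06Q" 4 (by norm_num) (by decide)).mpr h))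
    · exact Or.inr (Or.inr ((slice_eq_iff_startswith code "H04L" 4 (by norm_num) (by decide)).mpr h))

lemma pHit_video (code : String) :
    (PySem.Dict.get? pvPrefixToTag (PySem.Str.slice code none (some 3)) = some "video" ∨
     PySem.Dict.get? pvPrefixToTag (PySem.Str.slice code none (some 4)) = some "video") ↔
    (PySem.Str.startswith code "H04N" = true ∨ PySem.Str.startswith code "H04S" = true) := by
  rw [get?_pf_video, get?_pf_video]
  constructor
  · rintro ((h | h) | (h | h))
    · exact absurd (slice3_length _ _ h) (by decide)
    · exact absurd (slice3_length _ _ h) (by decide)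
    · exact Or.inl ((slice_eq_iff_startswith code "H04N" 4 (by norm_num) (by decide)).mp h)
    · exact Or.inr ((slice_eq_iff_startswith code "H04S" 4 (by norm_num) (by decide)).mp h)
  · rintro (h | h)
    · exact Or.inr (Or.inl ((slice_eq_iff_startswith code "H04N" 4 (by norm_num) (by decide)).mpr h))
    · exact Or.inr (Or.inr ((slice_eq_iff_startswith code "H04S" 4 (by norm_num) (by decide)).mpr h))

-- the four membership booleans of B's found set, as A's conditions
lemma contains_found_compute (text : String) (cpc : List String) :
    PySem.Set.contains (pvFound text cpc) "compute" =
      (cpc.any (fun code => ["G06F", "G06N", "G11"].any (fun p => PySem.Str.startswith code p))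
       || ["compute", "processor", "gpu", "accelerator", "cpu"].any (fun k => PySem.Str.isIn k text)) := by
  rw [Bool.eq_iff_iff, PySem.Set.contains_iff]
  unfold pvFound
  rw [mem_kwFold, mem_foldl_pvPrefixStep, items_pvKeywordToTag]
  simp only [List.exists_mem_cons_iff, List.any_eq_true, List.any_cons, List.any_nil,
    Bool.or_eq_true, pHit_compute]
  simp [PySem.Set.empty]

lemma contains_found_data (text : String) (cpc : List String) :
    PySem.Set.contains (pvFound text cpc) "data" =
      (cpc.any (fun code => ["G06Q", "H04L"].any (fun p => PySem.Str.startswith code p))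
       || ["data", "database", "analytics", "storage"].any (fun k => PySem.Str.isIn k text)) := by
  rw [Bool.eq_iff_iff, PySem.Set.contains_iff]
  unfold pvFound
  rw [mem_kwFold, mem_foldl_pvPrefixStep, items_pvKeywordToTag]
  simp only [List.exists_mem_cons_iff, List.any_eq_true, List.any_cons, List.any_nil,
    Bool.or_eq_true, pHit_data]
  simp [PySem.Set.empty]

lemma contains_found_video (text : String) (cpc : List String) :
    PySem.Set.contains (pvFound text cpc) "video" =
      (cpc.any (fun code => ["H04N", "H04S"].any (fun p => PySem.Str.startswith code p))
       || ["video", "codec", "encoding", "transcoding", "streaming"].any (fun k => PySem.Str.isIn k text)) := by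
  rw [Bool.eq_iff_iff, PySem.Set.contains_iff]
  unfold pvFound
  rw [mem_kwFold, mem_foldl_pvPrefixStep, items_pvKeywordToTag]
  simp only [List.exists_mem_cons_iff, List.any_eq_true, List.any_cons, List.any_nil,
    Bool.or_eq_true, pHit_video]
  simp [PySem.Set.empty]

lemma contains_found_cloud (text : String) (cpc : List String) :
    PySem.Set.contains (pvFound text cpc) "cloud" =
      (["cloud", "saas", "paas", "iaas", "data center", "datacenter"].any (fun k => PySem.Str.isIn k text)) := by
  rw [Bool.eq_iff_iff, PySem.Set.contains_iff]
  unfold pvFound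
  rw [mem_kwFold, mem_foldl_pvPrefixStep, items_pvKeywordToTag]
  simp only [List.exists_mem_cons_iff, List.any_eq_true, List.any_cons, List.any_nil,
    Bool.or_eq_true]
  simp [PySem.Set.empty, get?_pf_cloud]

-- ===== VERDICT (by name: the statement is the Claim_ definition above) =====
theorem tag_patent_py_spec : Claim_equal_tag_patent_py := by
  intro title abstract cpc _
  unfold Spec_tag_patent_py tag_patent_py tag_patent_py_alt
  simp only [List.filter_cons, List.filter_nil, contains_found_cloud, contains_found_compute,
    contains_found_data, contains_found_video]
  by_cases h1 : (cpc.any (fun code => ["G06F", "G06N", "G11"].any (fun p => PySem.Str.startswith code p))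
       || ["compute", "processor", "gpu", "accelerator", "cpu"].any
            (fun k => PySem.Str.isIn k (PySem.Str.lower (PySem.Str.join " " [title, abstract])))) = true <;>
  by_cases h2 : (cpc.any (fun code => ["G06Q", "H04L"].any (fun p => PySem.Str.startswith code p))
       || ["data", "database", "analytics", "storage"].any
            (fun k => PySem.Str.isIn k (PySem.Str.lower (PySem.Str.join " " [title, abstract])))) = true <;>
  by_cases h3 : (cpc.any (fun code => ["H04N", "H04S"].any (fun p => PySem.Str.startswith code p))
       || ["video", "codec", "encoding", "transcoding", "streaming"].any
            (fun k => PySem.Str.isIn k (PySem.Str.lower (PySem.Str.join " " [title, abstract])))) = true <;>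
  by_cases h4 : (["cloud", "saas", "paas", "iaas", "data center", "datacenter"].any
            (fun k => PySem.Str.isIn k (PySem.Str.lower (PySem.Str.join " " [title, abstract])))) = true <;>
  simp only [h1, h2, h3, h4, if_true, if_false, Bool.false_eq_true, List.nil_append] <;>
  simp [PySem.List.sorted_eq_foldl_insertBy, PySem.List.insertBy, PySem.Set.ofList,
    PySem.Set.add, String.lt_iff_toList_lt] <;> decide
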